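-- pv_equiv track=rewrite | github.com/brianchi0607/PREFALLKD-PRE-IMPACT-FALL-DETECTION-VIA-CNN-VIT-KNOWLEDGE-DISTILLATION | Data_preprocessing.py | fall_window_testing
-- ===== SOURCE A (Python) =====
-- def fall_window_testing(falls, Fall_onset_frame, su_f, Impact_frame, lon):
--     test_data = []
--     test_sub = []
--     test_gt = []
--     for i in range(len(falls)):
--         for j in range(10):
--             if lon +10*j < Fall_onset_frame[i] :
--                 test_data.append(falls[i][10*j:lon+10*j])
--                 test_gt.append(0)
--                 test_sub.append(su_f[i])
--         # The first 3 pre-impact windows reaching over the fall onset moment in each fall instance were collected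
--         for j in range(100):
--            if (lon+10*j - Fall_onset_frame[i] >= 5):
--                test_data.append(falls[i][10*j:lon+10*j])
--                test_gt.append(1)
--                test_sub.append(su_f[i])
--                test_data.append(falls[i][10*(j+1):lon+10*(j+1)])
--                test_gt.append(1)
--                test_sub.append(su_f[i])
--                test_data.append(falls[i][10*(j+2):lon+10*(j+2)])
--                test_gt.append(1)
--                test_sub.append(su_f[i])
--                break
--
--     return test_data, test_gt, test_sub
-- ===== SOURCE B (Python) =====
-- def fall_window_testing(falls, Fall_onset_frame, su_f, Impact_frame, lon):
--     # closed-form window boundaries instead of predicate scans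
--     test_data, test_gt, test_sub = [], [], []
--     for i in range(len(falls)):
--         sig = falls[i]
--         d = Fall_onset_frame[i] - lon
--         sub = su_f[i]
--         # number of pre-onset windows: count of j in [0,10) with 10*j < d, i.e. ceil(d/10) clamped
--         k = min(10, max(0, -(-d // 10)))
--         for j in range(k):
--             test_data.append(sig[10 * j : lon + 10 * j])
--             test_gt.append(0)
--             test_sub.append(sub)
--         # first window index j0 with 10*j0 >= d + 5 (ceiling), then three consecutive windows
--         j0 = max(0, -(-(d + 5) // 10))
--         if j0 < 100:
--             for j in (j0, j0 + 1, j0 + 2):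
--                 test_data.append(sig[10 * j : lon + 10 * j])
--                 test_gt.append(1)
--                 test_sub.append(sub)
--     return test_data, test_gt, test_sub
-- ===== Notes on version B (the rewrite author's own statement) =====
-- stated objective: simpler
-- what changed: Replaces A's two predicate-scanning inner loops (scan j in range(10) testing 'lon+10*j < onset', and scan j in range(100) with break for the first j with 'lon+10*j-onset >= 5') by closed-form ceiling arithmetic: the count k of pre-onset windows and the first over-onset window index j0 are computed directly, so no predicate scanning remains.
import Mathlib
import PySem

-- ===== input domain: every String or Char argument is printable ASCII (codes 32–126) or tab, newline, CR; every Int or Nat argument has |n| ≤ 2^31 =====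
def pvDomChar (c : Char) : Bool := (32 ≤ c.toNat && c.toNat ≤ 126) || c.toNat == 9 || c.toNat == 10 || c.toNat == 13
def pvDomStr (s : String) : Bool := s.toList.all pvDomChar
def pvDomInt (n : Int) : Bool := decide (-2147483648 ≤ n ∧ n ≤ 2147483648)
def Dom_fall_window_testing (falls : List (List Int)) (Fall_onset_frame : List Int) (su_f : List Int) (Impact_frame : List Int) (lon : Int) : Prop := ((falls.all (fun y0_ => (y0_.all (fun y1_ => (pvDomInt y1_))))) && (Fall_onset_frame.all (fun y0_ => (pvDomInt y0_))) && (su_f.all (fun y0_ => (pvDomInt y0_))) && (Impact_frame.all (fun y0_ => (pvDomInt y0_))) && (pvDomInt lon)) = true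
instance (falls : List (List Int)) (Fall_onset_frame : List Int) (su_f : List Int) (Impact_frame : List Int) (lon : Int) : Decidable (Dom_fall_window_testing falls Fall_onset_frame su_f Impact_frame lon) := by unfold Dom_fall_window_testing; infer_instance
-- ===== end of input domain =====

-- ===== PORT A =====
-- One honest line: B replaces A's two predicate-scanning inner loops (over range(10) and
-- range(100) with break) by closed-form ceiling arithmetic for the window boundaries ("simpler").

-- window falls[i][10*j : lon+10*j]
def fwtAwin (sig : List Int) (lon j : Int) : List Int :=
  PySem.List.slice sig (some (10 * j)) (some (lon + 10 * j))

-- A, first inner loop: 'for j in range(10): if lon+10*j < onset: append …'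
def fwtA_loop1 (sig : List Int) (onset sub lon : Int) (js : List Int)
    (acc : List (List Int) × List Int × List Int) : List (List Int) × List Int × List Int :=
  js.foldl (fun a j =>
    if lon + 10 * j < onset then
      (a.1 ++ [fwtAwin sig lon j], a.2.1 ++ [0], a.2.2 ++ [sub])
    else a) acc

-- A, second inner loop: 'for j in range(100): if …: append three windows; break'
def fwtA_loop2 (sig : List Int) (onset sub lon : Int) :
    List Int → List (List Int) × List Int × List Int → List (List Int) × List Int × List Int
  | [], a => a
  | j :: rest, a =>
    if 5 ≤ lon + 10 * j - onset then
      let a1 := (a.1 ++ [fwtAwin sig lon j], a.2.1 ++ [1], a.2.2 ++ [sub])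
      let a2 := (a1.1 ++ [fwtAwin sig lon (j + 1)], a1.2.1 ++ [1], a1.2.2 ++ [sub])
      (a2.1 ++ [fwtAwin sig lon (j + 2)], a2.2.1 ++ [1], a2.2.2 ++ [sub])
    else fwtA_loop2 sig onset sub lon rest a

def fall_window_testing (falls : List (List Int)) (Fall_onset_frame : List Int) (su_f : List Int) (Impact_frame : List Int) (lon : Int) : List (List Int) × List Int × List Int :=
  (PySem.List.pyRange 0 (falls.length : Int)).foldl (fun a i =>
    match PySem.List.pyGet? falls i, PySem.List.pyGet? Fall_onset_frame i, PySem.List.pyGet? su_f i with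
    | some sig, some onset, some sub =>
        fwtA_loop2 sig onset sub lon (PySem.List.pyRange 0 100)
          (fwtA_loop1 sig onset sub lon (PySem.List.pyRange 0 10) a)
    | _, _, _ => a  -- unreachable under Pre_ (Python raises IndexError there)
    ) ([], [], [])

-- ===== PORT B =====
-- Source B, body of the loop over one fall: closed-form k and j0, no scans
-- B's window slice sig[10*j : lon+10*j]
def fwtBwin (sig : List Int) (lon j : Int) : List Int :=
  PySem.List.slice sig (some (10 * j)) (some (lon + 10 * j))

def fwtB_step (lon : Int) (sig : List Int) (onset sub : Int)
    (acc : List (List Int) × List Int × List Int) : List (List Int) × List Int × List Int :=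
  let d := onset - lon
  let k := min 10 (max 0 (-(PySem.Int.floordiv (-d) 10)))        -- min(10, max(0, -(-d // 10)))
  let acc1 := (PySem.List.pyRange 0 k).foldl
    (fun a j => (a.1 ++ [fwtBwin sig lon j], a.2.1 ++ [(0 : Int)], a.2.2 ++ [sub])) acc
  let j0 := max 0 (-(PySem.Int.floordiv (-(d + 5)) 10))          -- max(0, -(-(d+5) // 10))
  if j0 < 100 then
    [j0, j0 + 1, j0 + 2].foldl
      (fun a j => (a.1 ++ [fwtBwin sig lon j], a.2.1 ++ [(1 : Int)], a.2.2 ++ [sub])) acc1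
  else acc1

def fall_window_testing_alt (falls : List (List Int)) (Fall_onset_frame : List Int) (su_f : List Int) (Impact_frame : List Int) (lon : Int) : List (List Int) × List Int × List Int :=
  (PySem.List.pyRange 0 (falls.length : Int)).foldl (fun a i =>
    match PySem.List.pyGet? falls i with
    | none => a  -- unreachable under Pre_
    | some sig =>
      match PySem.List.pyGet? Fall_onset_frame i with
      | none => a  -- unreachable under Pre_
      | some onset =>
        match PySem.List.pyGet? su_f i with
        | none => a  -- unreachable under Pre_
        | some sub => fwtB_step lon sig onset sub a) ([], [], [])

-- ===== PRECONDITION & SPEC =====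
-- A indexes Fall_onset_frame[i] and (on every iteration, since one of the two branches always
-- fires) su_f[i] for each i < len(falls): it raises IndexError exactly when one of those lists
-- is shorter than falls. Pre_ excludes exactly those raising inputs.
def Pre_fall_window_testing (falls : List (List Int)) (Fall_onset_frame : List Int) (su_f : List Int) (Impact_frame : List Int) (lon : Int) : Prop :=
  falls.length ≤ Fall_onset_frame.length ∧ falls.length ≤ su_f.length
instance (falls : List (List Int)) (Fall_onset_frame : List Int) (su_f : List Int) (Impact_frame : List Int) (lon : Int) : Decidable (Pre_fall_window_testing falls Fall_onset_frame su_f Impact_frame lon) := by unfold Pre_fall_window_testing; infer_instance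

def pvWitness_fall_window_testing : List (List Int) × List Int × List Int × List Int × Int :=
  ([[1, 2, 3, 4, 5, 6, 7, 8, 9, 10, 11, 12]], [8], [3], [20], 3)

def Spec_fall_window_testing (falls : List (List Int)) (Fall_onset_frame : List Int) (su_f : List Int) (Impact_frame : List Int) (lon : Int) (out : List (List Int) × List Int × List Int) : Prop := out = fall_window_testing_alt falls Fall_onset_frame su_f Impact_frame lon
instance (falls : List (List Int)) (Fall_onset_frame : List Int) (su_f : List Int) (Impact_frame : List Int) (lon : Int) (out : List (List Int) × List Int × List Int) : Decidable (Spec_fall_window_testing falls Fall_onset_frame su_f Impact_frame lon out) := by unfold Spec_fall_window_testing; infer_instance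

-- ===== CLAIM (what is proved, stated in full; the proofs are below) =====
def Claim_equal_fall_window_testing : Prop := ∀ (falls : List (List Int)) (Fall_onset_frame : List Int) (su_f : List Int) (Impact_frame : List Int) (lon : Int), Dom_fall_window_testing falls Fall_onset_frame su_f Impact_frame lon → Pre_fall_window_testing falls Fall_onset_frame su_f Impact_frame lon → Spec_fall_window_testing falls Fall_onset_frame su_f Impact_frame lon (fall_window_testing falls Fall_onset_frame su_f Impact_frame lon)

-- ===== LEMMAS AND PROOFS =====

-- Loop 1: A's conditional scan over range(a,10) equals B's plain loop over range(a,k),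
-- given that the condition is 'j < k' on [0,10).
theorem fwt_loop1_eq (sig : List Int) (onset sub lon k : Int)
    (hk0 : 0 ≤ k) (hk10 : k ≤ 10)
    (hchar : ∀ j : Int, 0 ≤ j → j < 10 → (lon + 10 * j < onset ↔ j < k)) :
    ∀ (n : Nat) (a : Int) (acc : List (List Int) × List Int × List Int),
      a = 10 - (n : Int) → (n : Int) ≤ 10 →
      fwtA_loop1 sig onset sub lon (PySem.List.pyRange a 10) acc =
        (PySem.List.pyRange a k).foldl
          (fun b j => (b.1 ++ [fwtAwin sig lon j], b.2.1 ++ [(0 : Int)], b.2.2 ++ [sub])) acc := by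
  intro n
  induction n with
  | zero =>
      intro a acc ha _
      rw [PySem.List.pyRange_one_eq_nil (by omega), PySem.List.pyRange_one_eq_nil (by omega)]
      simp [fwtA_loop1]
  | succ m ih =>
      intro a acc ha hn
      have ha10 : a < 10 := by omega
      have ha0 : 0 ≤ a := by omega
      rw [PySem.List.pyRange_one_cons ha10]
      by_cases hcond : lon + 10 * a < onset
      · have hak : a < k := (hchar a ha0 ha10).mp hcond
        rw [PySem.List.pyRange_one_cons hak]
        simp only [fwtA_loop1, List.foldl_cons, if_pos hcond]
        exact ih (a + 1) _ (by omega) (by omega)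
      · have hak : k ≤ a := by
          by_contra h
          exact hcond ((hchar a ha0 ha10).mpr (by omega))
        rw [PySem.List.pyRange_one_eq_nil hak]
        simp only [fwtA_loop1, List.foldl_cons, if_neg hcond]
        have h2 := ih (a + 1) acc (by omega) (by omega)
        rw [PySem.List.pyRange_one_eq_nil (a := a + 1) (b := k) (by omega)] at h2
        simpa [fwtA_loop1] using h2

-- Loop 2: A's break-scan over range(a,100) equals B's direct jump to j0,
-- given that the condition is 'j0 ≤ j' on the nonnegatives, and a ≤ j0.
theorem fwt_loop2_eq (sig : List Int) (onset sub lon j0 : Int)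
    (hchar : ∀ j : Int, 0 ≤ j → (5 ≤ lon + 10 * j - onset ↔ j0 ≤ j)) :
    ∀ (n : Nat) (a : Int) (acc : List (List Int) × List Int × List Int),
      a = 100 - (n : Int) → (n : Int) ≤ 100 → 0 ≤ a → a ≤ j0 →
      fwtA_loop2 sig onset sub lon (PySem.List.pyRange a 100) acc =
        (if j0 < 100 then
          [j0, j0 + 1, j0 + 2].foldl
            (fun b j => (b.1 ++ [fwtAwin sig lon j], b.2.1 ++ [(1 : Int)], b.2.2 ++ [sub])) acc
        else acc) := by
  intro n
  induction n with
  | zero =>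
      intro a acc ha _ _ haj
      rw [PySem.List.pyRange_one_eq_nil (by omega), if_neg (by omega)]
      rfl
  | succ m ih =>
      intro a acc ha hn ha0 haj
      have ha100 : a < 100 := by omega
      rw [PySem.List.pyRange_one_cons ha100]
      by_cases hcond : 5 ≤ lon + 10 * a - onset
      · have hja : j0 ≤ a := (hchar a ha0).mp hcond
        have hEq : a = j0 := le_antisymm haj hja
        subst hEq
        simp only [fwtA_loop2, if_pos hcond, if_pos ha100]
        simp [List.foldl_cons, List.foldl_nil, List.append_assoc]
      · have hja : a + 1 ≤ j0 := by
          by_contra h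
          exact hcond ((hchar a ha0).mpr (by omega))
        simp only [fwtA_loop2, if_neg hcond]
        exact ih (a + 1) acc (by omega)
          (by omega) (by omega) hja

-- One fall instance: A's two inner loops equal B's closed-form step.
theorem fwtBwin_eq : fwtBwin = fwtAwin := rfl

theorem fwt_step_eq (sig : List Int) (onset sub lon : Int)
    (acc : List (List Int) × List Int × List Int) :
    fwtA_loop2 sig onset sub lon (PySem.List.pyRange 0 100)
      (fwtA_loop1 sig onset sub lon (PySem.List.pyRange 0 10) acc) =
    fwtB_step lon sig onset sub acc := by
  have hc1 := (PySem.Int.neg_floordiv_neg_eq_iff_of_pos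
    (a := onset - lon) (b := 10)
    (q := -(PySem.Int.floordiv (-(onset - lon)) 10)) (by omega)).mp rfl
  have hc2 := (PySem.Int.neg_floordiv_neg_eq_iff_of_pos
    (a := onset - lon + 5) (b := 10)
    (q := -(PySem.Int.floordiv (-(onset - lon + 5)) 10)) (by omega)).mp rfl
  have char1 : ∀ j : Int, 0 ≤ j → j < 10 →
      (lon + 10 * j < onset ↔ j < min 10 (max 0 (-(PySem.Int.floordiv (-(onset - lon)) 10)))) := by
    intro j h0 h10
    rw [min_def, max_def]
    split_ifs <;> omega
  have char2 : ∀ j : Int, 0 ≤ j →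
      (5 ≤ lon + 10 * j - onset ↔ max 0 (-(PySem.Int.floordiv (-(onset - lon + 5)) 10)) ≤ j) := by
    intro j h0
    rw [max_def]
    split_ifs <;> omega
  have hk0 : (0 : Int) ≤ min 10 (max 0 (-(PySem.Int.floordiv (-(onset - lon)) 10))) :=
    le_min (by norm_num) (le_max_left _ _)
  have hk10 : min 10 (max 0 (-(PySem.Int.floordiv (-(onset - lon)) 10))) ≤ 10 :=
    min_le_left _ _
  simp only [fwtB_step, fwtBwin_eq]
  rw [← fwt_loop1_eq sig onset sub lon _ hk0 hk10 char1 10 0 acc (by norm_num) (by norm_num)]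
  rw [fwt_loop2_eq sig onset sub lon
      (max 0 (-(PySem.Int.floordiv (-(onset - lon + 5)) 10))) char2
      100 0 _ (by norm_num) (by norm_num) le_rfl (le_max_left _ _)]

-- ===== VERDICT (by name: the statement is the Claim_ definition above) =====
theorem fall_window_testing_spec : Claim_equal_fall_window_testing := by
  intro falls F su imp lon _ hpre
  unfold Pre_fall_window_testing at hpre
  obtain ⟨h1, h2⟩ := hpre
  unfold Spec_fall_window_testing fall_window_testing fall_window_testing_alt
  refine PySem.List.foldl_congr_mem _ _ _ _ ?_
  intro acc i hi
  rw [PySem.List.mem_pyRange_one] at hi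
  have hiF : i < (F.length : Int) := by omega
  have hisu : i < (su.length : Int) := by omega
  rw [PySem.List.pyGet?_eq_some_getElem falls hi.1 hi.2,
      PySem.List.pyGet?_eq_some_getElem F hi.1 hiF,
      PySem.List.pyGet?_eq_some_getElem su hi.1 hisu]
  exact fwt_step_eq _ _ _ _ _
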